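-- pv_equiv track=rewrite | github.com/NateCamChiao/HilbertCurveVideo | root_folder/main.py | getHilbertPoints
-- ===== SOURCE A (Python) =====
-- def getHilbertPoints(order, startPoint, step):
--     def generatePoints(steps, order):
--         if order <= 1:
--             return steps
--         newString = []
--         A = "+BF-AFA-FB+"
--         B = "-AF+BFB+FA-"
--
--         for char in steps:
--             if char == "A":
--                 newString += A
--             elif char == "B":
--                 newString += B
--             else:
--                 newString += char
--         return generatePoints(newString, order - 1)
--     def getCoordinates(instructions, pointsArray, stepSize):
--         direction = 0  # 0: right, 1: up, 2: left, 3: down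
--         for char in instructions:
--             if char == "F":
--                 if direction == 0:
--                     pointsArray.append([pointsArray[-1][0] + stepSize, pointsArray[-1][1], 0])
--                 elif direction == 1:
--                     pointsArray.append([pointsArray[-1][0], pointsArray[-1][1] + stepSize, 0])
--                 elif direction == 2:
--                     pointsArray.append([pointsArray[-1][0] - stepSize, pointsArray[-1][1], 0])
--                 elif direction == 3:
--                     pointsArray.append([pointsArray[-1][0], pointsArray[-1][1] - stepSize, 0])
--             elif char == "+":
--                 direction = (direction + 1) % 4
--             elif char == "-":
--                 direction = (direction - 1) % 4
--         return pointsArray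
--
--     return getCoordinates(generatePoints("+BF-AFA-FB+", order), [startPoint], step)
-- ===== SOURCE B (Python) =====
-- def getHilbertPoints(order, startPoint, step):
--     A = "+BF-AFA-FB+"
--     B = "-AF+BFB+FA-"
--     pts = [startPoint]
--     d = 0
--     def run(symbols, order):
--         nonlocal d
--         for ch in symbols:
--             if ch == "F":
--                 x, y = pts[-1][0], pts[-1][1]
--                 if d == 0:
--                     pts.append([x + step, y, 0])
--                 elif d == 1:
--                     pts.append([x, y + step, 0])
--                 elif d == 2:
--                     pts.append([x - step, y, 0])
--                 elif d == 3:
--                     pts.append([x, y - step, 0])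
--             elif ch == "+":
--                 d = (d + 1) % 4
--             elif ch == "-":
--                 d = (d - 1) % 4
--             elif order > 1:
--                 run(A if ch == "A" else B, order - 1)
--     run(A, order)
--     return pts
-- ===== Notes on version B (the rewrite author's own statement) =====
-- stated objective: alternative
-- what changed: B replaces A's order-many whole-string L-system rewrites followed by a separate turtle walk with a single recursive interpreter that executes F/+/- immediately and recurses into the A/B productions with order-1, so the expanded instruction string is never materialized.
import Mathlib
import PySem

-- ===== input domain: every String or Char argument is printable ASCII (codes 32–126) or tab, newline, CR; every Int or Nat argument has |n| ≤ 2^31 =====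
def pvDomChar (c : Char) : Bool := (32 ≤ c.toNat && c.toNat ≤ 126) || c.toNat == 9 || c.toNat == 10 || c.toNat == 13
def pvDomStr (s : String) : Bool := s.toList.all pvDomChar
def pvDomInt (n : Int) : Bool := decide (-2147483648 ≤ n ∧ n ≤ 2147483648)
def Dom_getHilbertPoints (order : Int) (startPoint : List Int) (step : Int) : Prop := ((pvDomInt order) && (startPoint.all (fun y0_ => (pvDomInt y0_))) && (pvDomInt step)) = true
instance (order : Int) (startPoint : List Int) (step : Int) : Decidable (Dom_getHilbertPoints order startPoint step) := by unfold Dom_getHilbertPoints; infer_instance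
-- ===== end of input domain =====

-- B replaces A's repeated whole-string L-system expansion by a recursive interpreter that
-- executes symbols directly, threading the point list and direction (objective: alternative).

-- ===== PORT A =====
-- the production / axiom strings of A
def pvProdA : List Char := ['+','B','F','-','A','F','A','-','F','B','+']
def pvProdB : List Char := ['-','A','F','+','B','F','B','+','F','A','-']

-- generatePoints: rebuilds the whole instruction string once per level
def pvGen (steps : List Char) (order : Int) : List Char :=
  if order ≤ 1 then steps
  else pvGen (steps.foldl (fun acc c =>
        acc ++ (if c = 'A' then pvProdA else if c = 'B' then pvProdB else [c])) []) (order - 1)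
termination_by (order - 1).toNat
decreasing_by omega

-- loop body of getCoordinates (state = (pointsArray, direction)); pyGet?+getD is exact
-- wherever Python returns: under Pre_ the indexed point always has ≥ 2 coordinates
def pvStepA (stepSize : Int) (st : List (List Int) × Int) (c : Char) : List (List Int) × Int :=
  let pts := st.1
  let d := st.2
  if c = 'F' then
    let last := (PySem.List.pyGet? pts (-1)).getD []
    let x := (PySem.List.pyGet? last 0).getD 0
    let y := (PySem.List.pyGet? last 1).getD 0
    if d = 0 then (pts ++ [[x + stepSize, y, 0]], d)
    else if d = 1 then (pts ++ [[x, y + stepSize, 0]], d)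
    else if d = 2 then (pts ++ [[x - stepSize, y, 0]], d)
    else if d = 3 then (pts ++ [[x, y - stepSize, 0]], d)
    else st
  else if c = '+' then (pts, PySem.Int.mod (d + 1) 4)
  else if c = '-' then (pts, PySem.Int.mod (d - 1) 4)
  else st

def getHilbertPoints (order : Int) (startPoint : List Int) (step : Int) : List (List Int) :=
  ((pvGen pvProdA order).foldl (pvStepA step) ([startPoint], 0)).1

-- ===== PORT B =====  (B's Python defines the same production strings A and B; shared above)
-- loop body of B's run for the immediate symbols 'F' / '+' / '-'
def pvStepB (stepSize : Int) (st : List (List Int) × Int) (c : Char) : List (List Int) × Int :=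
  let pts := st.1
  let d := st.2
  if c = 'F' then
    let x := (PySem.List.pyGet? ((PySem.List.pyGet? pts (-1)).getD []) 0).getD 0
    let y := (PySem.List.pyGet? ((PySem.List.pyGet? pts (-1)).getD []) 1).getD 0
    if d = 0 then (pts ++ [[x + stepSize, y, 0]], d)
    else if d = 1 then (pts ++ [[x, y + stepSize, 0]], d)
    else if d = 2 then (pts ++ [[x - stepSize, y, 0]], d)
    else if d = 3 then (pts ++ [[x, y - stepSize, 0]], d)
    else st
  else if c = '+' then (pts, PySem.Int.mod (d + 1) 4)
  else (pts, PySem.Int.mod (d - 1) 4)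

-- run: interpret the symbol string at the given order, recursing into productions
def pvRun (stepSize : Int) (o : Int) (syms : List Char) (st : List (List Int) × Int) :
    List (List Int) × Int :=
  match syms with
  | [] => st
  | c :: rest =>
    if c = 'F' ∨ c = '+' ∨ c = '-' then
      pvRun stepSize o rest (pvStepB stepSize st c)
    else if 1 < o then
      pvRun stepSize o rest (pvRun stepSize (o - 1) (if c = 'A' then pvProdA else pvProdB) st)
    else
      pvRun stepSize o rest st
termination_by (o.toNat, syms.length)
decreasing_by
  · exact Prod.Lex.right _ (by simp)
  · exact Prod.Lex.left _ _ (by omega)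
  · exact Prod.Lex.right _ (by simp)
  · exact Prod.Lex.right _ (by simp)

def getHilbertPoints_alt (order : Int) (startPoint : List Int) (step : Int) : List (List Int) :=
  (pvRun step order pvProdA ([startPoint], 0)).1

-- ===== PRECONDITION & SPEC =====
-- Pre_ excludes exactly the start points with fewer than 2 coordinates, on which the
-- Python A (and B) raises IndexError at startPoint[0]/startPoint[1].
def Pre_getHilbertPoints (order : Int) (startPoint : List Int) (step : Int) : Prop :=
  2 ≤ startPoint.length
instance (order : Int) (startPoint : List Int) (step : Int) : Decidable (Pre_getHilbertPoints order startPoint step) := by unfold Pre_getHilbertPoints; infer_instance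

def pvWitness_getHilbertPoints : Int × List Int × Int := (2, [0, 0], 1)

def Spec_getHilbertPoints (order : Int) (startPoint : List Int) (step : Int) (out : List (List Int)) : Prop := out = getHilbertPoints_alt order startPoint step
instance (order : Int) (startPoint : List Int) (step : Int) (out : List (List Int)) : Decidable (Spec_getHilbertPoints order startPoint step out) := by unfold Spec_getHilbertPoints; infer_instance

-- ===== CLAIM (what is proved, stated in full; the proofs are below) =====
def Claim_equal_getHilbertPoints : Prop := ∀ (order : Int) (startPoint : List Int) (step : Int), Dom_getHilbertPoints order startPoint step → Pre_getHilbertPoints order startPoint step → Spec_getHilbertPoints order startPoint step (getHilbertPoints order startPoint step)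

-- ===== LEMMAS AND PROOFS =====

-- one expansion step of a single symbol
def pvExp1 (c : Char) : List Char :=
  if c = 'A' then pvProdA else if c = 'B' then pvProdB else [c]

-- one expansion step of a string
def pvH (xs : List Char) : List Char := xs.flatMap pvExp1

lemma pvH_append (xs ys : List Char) : pvH (xs ++ ys) = pvH xs ++ pvH ys := by
  simp [pvH]

lemma pvHIter_nil (k : Nat) : pvH^[k] [] = [] := by
  induction k with
  | zero => rfl
  | succ k ih => rw [Function.iterate_succ_apply, show pvH [] = [] from rfl, ih]

lemma pvHIter_append (k : Nat) (xs ys : List Char) :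
    pvH^[k] (xs ++ ys) = pvH^[k] xs ++ pvH^[k] ys := by
  induction k generalizing xs ys with
  | zero => rfl
  | succ k ih => rw [Function.iterate_succ_apply, Function.iterate_succ_apply,
      Function.iterate_succ_apply, pvH_append, ih]

lemma pvHIter_fixed (k : Nat) (c : Char) (h : pvExp1 c = [c]) : pvH^[k] [c] = [c] := by
  induction k with
  | zero => rfl
  | succ k ih =>
    rw [Function.iterate_succ_apply, show pvH [c] = pvExp1 c by simp [pvH], h, ih]

lemma pvGen_eq_aux (n : Nat) : ∀ (order : Int), (order - 1).toNat = n → ∀ (steps : List Char),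
    pvGen steps order = pvH^[n] steps := by
  induction n with
  | zero =>
    intro order h steps
    rw [pvGen, if_pos (by omega : order ≤ 1)]
    rfl
  | succ n ihn =>
    intro order h steps
    rw [pvGen, if_neg (by omega : ¬ order ≤ 1)]
    have hfold : (steps.foldl (fun acc c =>
        acc ++ (if c = 'A' then pvProdA else if c = 'B' then pvProdB else [c])) [])
        = pvH steps := by
      rw [PySem.List.foldl_append_eq_flatMap]; rfl
    rw [hfold, ihn (order - 1) (by omega), ← Function.iterate_succ_apply]

lemma pvGen_eq (order : Int) (steps : List Char) :
    pvGen steps order = pvH^[(order - 1).toNat] steps :=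
  pvGen_eq_aux (order - 1).toNat order rfl steps

def pvOkChar (c : Char) : Prop := c = 'F' ∨ c = '+' ∨ c = '-' ∨ c = 'A' ∨ c = 'B'

lemma pvOk_prodA : ∀ c ∈ pvProdA, pvOkChar c := by intro c hc; unfold pvOkChar; unfold pvProdA at hc; fin_cases hc <;> simp
lemma pvOk_prodB : ∀ c ∈ pvProdB, pvOkChar c := by intro c hc; unfold pvOkChar; unfold pvProdB at hc; fin_cases hc <;> simp

-- the key bridge: on symbol strings over the L-system alphabet, the recursive
-- interpreter equals walking the fully expanded string
lemma pvRun_eq (stepSize : Int) (n : Nat) :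
    ∀ (o : Int), o.toNat ≤ n → ∀ (syms : List Char), (∀ c ∈ syms, pvOkChar c) →
      ∀ (st : List (List Int) × Int),
      pvRun stepSize o syms st = (pvH^[(o - 1).toNat] syms).foldl (pvStepA stepSize) st := by
  induction n with
  | zero =>
    intro o ho syms hok st
    induction syms generalizing st with
    | nil => rw [pvRun, pvHIter_nil]; rfl
    | cons c rest ih =>
      have hnot : ¬ (1 < o) := by omega
      have h0 : (o - 1).toNat = 0 := by omega
      simp only [h0, Function.iterate_zero, id_eq] at ih ⊢
      have hrest := fun c hc => hok c (List.mem_cons_of_mem _ hc)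
      rw [pvRun]
      by_cases hc : c = 'F' ∨ c = '+' ∨ c = '-'
      · rw [if_pos hc, ih hrest, List.foldl_cons]
        congr 1
        rcases hc with h | h | h <;> subst h <;> simp [pvStepA, pvStepB]
      · rw [if_neg hc, if_neg hnot, ih hrest, List.foldl_cons]
        congr 1
        simp only [not_or] at hc
        simp [pvStepA, hc.1, hc.2.1, hc.2.2]
  | succ n ihn =>
    intro o ho syms hok st
    induction syms generalizing st with
    | nil => rw [pvRun, pvHIter_nil]; rfl
    | cons c rest ih =>
      have hrest := fun c hc => hok c (List.mem_cons_of_mem _ hc)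
      have hsplit : pvH^[(o - 1).toNat] (c :: rest)
          = pvH^[(o - 1).toNat] [c] ++ pvH^[(o - 1).toNat] rest := by
        rw [← pvHIter_append]; rfl
      rw [pvRun, hsplit, List.foldl_append]
      by_cases hc : c = 'F' ∨ c = '+' ∨ c = '-'
      · rw [if_pos hc, ih hrest]
        congr 1
        have hfix : pvExp1 c = [c] := by
          rcases hc with h | h | h <;> subst h <;> rfl
        rw [pvHIter_fixed _ _ hfix, List.foldl_cons, List.foldl_nil]
        rcases hc with h | h | h <;> subst h <;> simp [pvStepA, pvStepB]
      · have hAB : c = 'A' ∨ c = 'B' := by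
          have := hok c List.mem_cons_self
          rcases this with h | h | h | h | h <;> simp_all [pvOkChar]
        rw [if_neg hc]
        by_cases hgt : 1 < o
        · rw [if_pos hgt, ih hrest]
          congr 1
          have hk : (o - 1).toNat = ((o - 1) - 1).toNat + 1 := by omega
          rw [hk, Function.iterate_succ_apply, show pvH [c] = pvExp1 c by simp [pvH]]
          have hsub : (o - 1).toNat ≤ n := by omega
          rcases hAB with h | h <;> subst h
          · rw [if_pos rfl,
              ihn (o - 1) hsub pvProdA pvOk_prodA, show pvExp1 'A' = pvProdA from rfl]
          · rw [if_neg (by decide),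
              ihn (o - 1) hsub pvProdB pvOk_prodB, show pvExp1 'B' = pvProdB from rfl]
        · rw [if_neg hgt, ih hrest]
          congr 1
          have h0 : (o - 1).toNat = 0 := by omega
          rw [h0]
          simp only [Function.iterate_zero, id_eq, List.foldl_cons, List.foldl_nil]
          simp only [not_or] at hc
          simp [pvStepA, hc.1, hc.2.1, hc.2.2]

-- ===== VERDICT (by name: the statement is the Claim_ definition above) =====
theorem getHilbertPoints_spec : Claim_equal_getHilbertPoints := by
  intro order startPoint step _ _
  unfold Spec_getHilbertPoints getHilbertPoints getHilbertPoints_alt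
  rw [pvRun_eq step order.toNat order (le_refl _) pvProdA pvOk_prodA ([startPoint], 0),
      pvGen_eq order pvProdA]
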